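-- pv_equiv track=rewrite | github.com/Pinky2207/Project | BasicPythonCodesForPractice/exercise_2.py | non_prime
-- ===== SOURCE A (Python) =====
-- def non_prime(a,b):
--   # Set upper and lower as the min/max of a and b
--   lower = min(a, b)
--   upper = max(a, b)
--
--   # Create an empty list for non-prime numbers
--   non_prime_nums_list = []
--
--   # Loop through each number between lower and upper (inclusive)
--   for number in range(lower, upper+1):
--     # Check if the number is greater than or equal to 1
--     if number >= 1:
--       # Loop through each index between 2 and the number (exclusive)
--       for index in range(2, number):
--         # Check if the number is divisible by the index with no remainder
--         if (number % index) == 0: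
--           # If the number is divisible by the index,
--           # add it to the non_prime_nums_list
--           non_prime_nums_list.append(number)
--           break
--
--   # Return the list of non-prime numbers
--   return non_prime_nums_list
-- ===== SOURCE B (Python) =====
-- def _is_composite(n):
--     # trial division up to the square root
--     if n < 4:
--         return False
--     d = 2
--     while d * d <= n:
--         if n % d == 0:
--             return True
--         d += 1
--     return False
--
-- def non_prime(a, b):
--     lower, upper = min(a, b), max(a, b)
--     return [n for n in range(lower, upper + 1) if _is_composite(n)]
-- ===== Notes on version B (the rewrite author's own statement) =====
-- stated objective: faster
-- what changed: B filters the range with a trial-division-up-to-sqrt compositeness test (early cutoff at d*d>n) instead of A's inner scan over all candidate divisors 2..n-1 for prime inputs.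
import Mathlib
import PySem

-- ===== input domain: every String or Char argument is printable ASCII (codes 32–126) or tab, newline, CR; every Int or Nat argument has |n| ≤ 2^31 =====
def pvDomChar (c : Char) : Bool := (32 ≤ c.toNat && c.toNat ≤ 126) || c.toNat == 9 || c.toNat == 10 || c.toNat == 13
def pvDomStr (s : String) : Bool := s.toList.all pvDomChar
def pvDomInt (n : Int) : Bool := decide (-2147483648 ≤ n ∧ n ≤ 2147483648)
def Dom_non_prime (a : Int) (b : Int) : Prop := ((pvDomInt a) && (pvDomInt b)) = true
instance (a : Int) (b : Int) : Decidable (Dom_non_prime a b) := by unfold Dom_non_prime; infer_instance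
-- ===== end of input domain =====

-- B replaces A's inner scan over all divisors 2..n-1 by a trial-division test that stops at d*d > n (asymptotically faster per element).

-- ===== PORT A =====
-- inner 'for index in range(2, number): if number % index == 0: append; break'
-- returning true exactly when the break fires
def innerA (number : Int) : List Int → Bool
  | [] => false
  | d :: ds => if PySem.Int.mod number d == 0 then true else innerA number ds

def non_prime (a : Int) (b : Int) : List Int :=
  let lower := min a b
  let upper := max a b
  (PySem.List.pyRange lower (upper + 1)).foldl
    (fun acc number =>
      if 1 ≤ number then
        if innerA number (PySem.List.pyRange 2 number) then acc ++ [number] else acc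
      else acc) []

-- ===== PORT B =====
-- 'while d * d <= n: …' ; the '2 ≤ d' conjunct only makes the recursion total
-- (every call site has d ≥ 2, so it never changes the computed value)
def trialDiv (n : Int) (d : Int) : Bool :=
  if h : 2 ≤ d ∧ d * d ≤ n then
    if PySem.Int.mod n d == 0 then true else trialDiv n (d + 1)
  else false
termination_by (n - d).toNat
decreasing_by
  have hd : d < d * d := by nlinarith [h.1]
  omega

def isComposite (n : Int) : Bool :=
  if n < 4 then false else trialDiv n 2

def non_prime_alt (a : Int) (b : Int) : List Int :=
  (PySem.List.pyRange (min a b) (max a b + 1)).filter isComposite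

-- ===== PRECONDITION & SPEC =====
def Spec_non_prime (a : Int) (b : Int) (out : List Int) : Prop := out = non_prime_alt a b
instance (a : Int) (b : Int) (out : List Int) : Decidable (Spec_non_prime a b out) := by unfold Spec_non_prime; infer_instance

-- ===== CLAIM (what is proved, stated in full; the proofs are below) =====
def Claim_equal_non_prime : Prop := ∀ (a : Int) (b : Int), Dom_non_prime a b → Spec_non_prime a b (non_prime a b)

-- ===== LEMMAS AND PROOFS =====

-- A's inner loop finds a divisor iff some element of the scanned list divides
theorem innerA_eq_any (n : Int) (l : List Int) :
    innerA n l = l.any (fun d => PySem.Int.mod n d == 0) := by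
  induction l with
  | nil => rfl
  | cons d ds ih =>
    simp only [innerA, List.any_cons]
    split <;> simp_all

theorem innerA_true_iff (n : Int) :
    innerA n (PySem.List.pyRange 2 n) = true ↔ ∃ d, 2 ≤ d ∧ d < n ∧ d ∣ n := by
  rw [innerA_eq_any, List.any_eq_true]
  constructor
  · rintro ⟨d, hm, hd⟩
    rw [PySem.List.mem_pyRange_one] at hm
    exact ⟨d, hm.1, hm.2, (PySem.Int.mod_eq_zero_iff_dvd n d).mp (by simpa using hd)⟩
  · rintro ⟨d, h2, hlt, hdvd⟩
    exact ⟨d, PySem.List.mem_pyRange_one.mpr ⟨h2, hlt⟩,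
      by simpa using (PySem.Int.mod_eq_zero_iff_dvd n d).mpr hdvd⟩

-- B's while loop finds a divisor iff some d' ≥ d with d'*d' ≤ n divides
theorem trialDiv_true_iff (n : Int) (d : Int) (hd : 2 ≤ d) :
    trialDiv n d = true ↔ ∃ e, d ≤ e ∧ e * e ≤ n ∧ e ∣ n := by
  fun_induction trialDiv n d with
  | case1 d h hm =>
    simp only [true_iff]
    exact ⟨_, le_refl _, h.2, (PySem.Int.mod_eq_zero_iff_dvd _ _).mp (by simpa using hm)⟩
  | case2 d h hm ih =>
    rw [ih (by omega)]
    constructor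
    · rintro ⟨e, he, h2, h3⟩; exact ⟨e, by omega, h2, h3⟩
    · rintro ⟨e, he, h2, h3⟩
      refine ⟨e, ?_, h2, h3⟩
      rcases eq_or_lt_of_le he with rfl | hlt
      · exact absurd ((PySem.Int.mod_eq_zero_iff_dvd _ _).mpr h3) (by simpa using hm)
      · omega
  | case3 d h =>
    simp only [Bool.false_eq_true, false_iff]
    rintro ⟨e, he, hsq, -⟩
    have : d * d ≤ e * e := by nlinarith
    exact h ⟨hd, by omega⟩

-- a number ≥ 1 has a proper divisor ≥ 2 iff it has one below its square root
theorem pointwise (n : Int) :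
    (decide (1 ≤ n) && innerA n (PySem.List.pyRange 2 n)) = isComposite n := by
  unfold isComposite
  by_cases h4 : n < 4
  · rw [if_pos h4]
    by_cases h1 : 1 ≤ n
    · have : n = 1 ∨ n = 2 ∨ n = 3 := by omega
      rcases this with rfl | rfl | rfl <;> decide
    · simp [h1]
  · rw [if_neg h4]
    have h1 : 1 ≤ n := by omega
    simp only [h1, decide_true, Bool.true_and]
    rw [Bool.eq_iff_iff, innerA_true_iff, trialDiv_true_iff n 2 (le_refl 2)]
    constructor
    · rintro ⟨d, h2, hlt, hdvd⟩
      obtain ⟨c, hc⟩ := hdvd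
      have hc2 : 2 ≤ c := by nlinarith
      by_cases hsq : d * d ≤ n
      · exact ⟨d, h2, hsq, c, hc⟩
      · have hcd : c < d := by nlinarith
        exact ⟨c, hc2, by nlinarith, ⟨d, by rw [hc]; ring⟩⟩
    · rintro ⟨e, h2, hsq, hdvd⟩
      exact ⟨e, h2, by nlinarith, hdvd⟩

theorem non_prime_eq (a b : Int) : non_prime a b = non_prime_alt a b := by
  unfold non_prime non_prime_alt
  have hf : (fun (acc : List Int) (number : Int) =>
      if 1 ≤ number then
        if innerA number (PySem.List.pyRange 2 number) then acc ++ [number] else acc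
      else acc)
    = (fun acc x =>
        if (decide (1 ≤ x) && innerA x (PySem.List.pyRange 2 x)) = true
        then acc ++ [id x] else acc) := by
    funext acc x
    by_cases h1 : 1 ≤ x <;> by_cases h2 : innerA x (PySem.List.pyRange 2 x) <;>
      simp [h1, h2]
  simp only [hf, PySem.List.foldl_append_if, List.map_id, List.nil_append]
  congr 1
  funext n
  exact pointwise n

-- ===== VERDICT (by name: the statement is the Claim_ definition above) =====
theorem non_prime_spec : Claim_equal_non_prime := by
  intro a b _
  unfold Spec_non_prime
  exact non_prime_eq a b
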